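-- pv_equiv track=rewrite | github.com/lonomoji/vampy-portfolio | YASDSSSS.py | isYas
-- ===== SOURCE A (Python) =====
-- def isYas(word):
-- 	Yasses = True
-- 	state=0
-- 	for i in range(len(word)):
-- 		if word[i].isalpha():
-- 			if state == 0:
-- 				if word[i] in ["Y","y"]:
-- 					state=1
-- 				else:
-- 					Yasses = False
-- 			elif state == 1:
-- 				if word[i] in ["Y","y"]:
-- 					state=1
-- 				elif word[i] in ["A","a"]:
-- 					state=2
-- 				else:
-- 					Yasses = False
-- 			elif state == 2:
-- 				if word[i]in ["A","a"]:
-- 					state = 2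
-- 				elif word[i]in ["S","s"]:
-- 					state = 3
-- 				else:
-- 					Yasses = False
-- 			elif state == 3:
-- 				if word[i]in ["S","s"]:
-- 					state = 3
-- 				else:
-- 					Yasses = False
-- 	if state != 3:
-- 		Yasses = False
-- 	return Yasses
-- ===== SOURCE B (Python) =====
-- import re
--
-- def isYas(word):
--     filtered = ''.join(c for c in word if c.isalpha())
--     return bool(re.fullmatch(r'[Yy]+[Aa]+[Ss]+', filtered))
-- ===== Notes on version B (the rewrite author's own statement) =====
-- stated objective: idiomatic
-- what changed: Replaced the hand-written 4-state per-character loop with a two-step pipeline: filter to alphabetic characters, then a single regex fullmatch against [Yy]+[Aa]+[Ss]+.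
import Mathlib
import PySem

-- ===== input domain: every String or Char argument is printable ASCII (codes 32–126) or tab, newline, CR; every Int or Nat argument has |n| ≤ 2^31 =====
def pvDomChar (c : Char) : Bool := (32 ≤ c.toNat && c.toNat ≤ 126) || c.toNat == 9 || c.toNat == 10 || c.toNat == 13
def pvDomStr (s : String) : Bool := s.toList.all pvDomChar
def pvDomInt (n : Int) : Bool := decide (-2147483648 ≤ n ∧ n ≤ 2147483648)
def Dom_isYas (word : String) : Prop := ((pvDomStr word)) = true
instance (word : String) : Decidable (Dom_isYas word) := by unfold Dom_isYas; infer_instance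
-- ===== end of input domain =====

-- B replaces A's hand-written 4-state loop with filter-to-alphabetic then a regex-style
-- fullmatch of [Yy]+[Aa]+[Ss]+ (idiomatic; same O(n) cost).


-- ===== PORT A =====
-- A's loop body: the nested state-machine ifs (state, Yasses), branches in A's order.
def yasInner (st : Int × Bool) (c : Char) : Int × Bool :=
  if st.1 == 0 then
    if c == 'Y' || c == 'y' then (1, st.2) else (st.1, false)
  else if st.1 == 1 then
    if c == 'Y' || c == 'y' then (1, st.2)
    else if c == 'A' || c == 'a' then (2, st.2)
    else (st.1, false)
  else if st.1 == 2 then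
    if c == 'A' || c == 'a' then (2, st.2)
    else if c == 'S' || c == 's' then (3, st.2)
    else (st.1, false)
  else if st.1 == 3 then
    if c == 'S' || c == 's' then (3, st.2)
    else (st.1, false)
  else st

def isYas (word : String) : Bool :=
  let r := word.toList.foldl
    (fun st c => if PySem.Chars.isalpha c then yasInner st c else st) (0, true)
  if r.1 != 3 then false else r.2

-- ===== PORT B =====
-- port of re.fullmatch piece '[X]+': consume one mandatory char of the class, then greedily
-- the rest (the three classes are disjoint, so greedy matching is exact for this regex)
def matchPlus (p : Char → Bool) (l : List Char) : Option (List Char) :=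
  match l with
  | [] => none
  | c :: t => if p c then some (t.dropWhile p) else none

def isYas_alt (word : String) : Bool :=
  let filtered := word.toList.filter PySem.Chars.isalpha
  match matchPlus (fun c => c == 'Y' || c == 'y') filtered with
  | none => false
  | some r1 =>
    match matchPlus (fun c => c == 'A' || c == 'a') r1 with
    | none => false
    | some r2 =>
      match matchPlus (fun c => c == 'S' || c == 's') r2 with
      | none => false
      | some r3 => r3.isEmpty

-- ===== PRECONDITION & SPEC =====
def Spec_isYas (word : String) (out : Bool) : Prop := out = isYas_alt word
instance (word : String) (out : Bool) : Decidable (Spec_isYas word out) := by unfold Spec_isYas; infer_instance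

-- ===== CLAIM (what is proved, stated in full; the proofs are below) =====
def Claim_equal_isYas : Prop := ∀ (word : String), Dom_isYas word → Spec_isYas word (isYas word)

-- ===== LEMMAS AND PROOFS =====

def isY (c : Char) : Bool := c == 'Y' || c == 'y'
def isA (c : Char) : Bool := c == 'A' || c == 'a'
def isS (c : Char) : Bool := c == 'S' || c == 's'

-- A's result from a given start state, over an (already filtered) list
def resA (l : List Char) (st : Int × Bool) : Bool :=
  let r := l.foldl yasInner st
  if r.1 != 3 then false else r.2

-- characterisations of "accepted from state k"
def rhs2 (l : List Char) : Bool :=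
  let r := l.dropWhile isA
  !r.isEmpty && r.all isS

def rhs1 (l : List Char) : Bool :=
  match l.dropWhile isY with
  | [] => false
  | c :: t => isA c && rhs2 t

theorem yasInner_snd_false (s : Int) (c : Char) : yasInner (s, false) c = ((yasInner (s, false) c).1, false) := by
  unfold yasInner; split_ifs <;> rfl

theorem foldl_yasInner_false (l : List Char) (s : Int) :
    (l.foldl yasInner (s, false)).2 = false := by
  induction l generalizing s with
  | nil => rfl
  | cons c t ih =>
    rw [List.foldl_cons, yasInner_snd_false]
    exact ih _

theorem resA_false (l : List Char) (s : Int) : resA l (s, false) = false := by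
  simp [resA, foldl_yasInner_false]

theorem resA_three (l : List Char) : resA l (3, true) = l.all isS := by
  induction l with
  | nil => simp [resA]
  | cons c t ih =>
    by_cases hs : isS c = true
    · have h1 : resA (c :: t) (3, true) = resA t (3, true) := by
        simp only [resA, List.foldl_cons]
        simp [isS] at hs
        rcases hs with h | h <;> simp [yasInner, h]
      rw [h1, ih]; simp [hs]
    · have h1 : resA (c :: t) (3, true) = false := by
        simp only [resA, List.foldl_cons]
        simp [isS] at hs
        have h2 : yasInner (3, true) c = (3, false) := by
          simp [yasInner, hs.1, hs.2]
        rw [h2]; exact resA_false t 3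
      rw [h1]; simp [hs]

theorem resA_two (l : List Char) : resA l (2, true) = rhs2 l := by
  induction l with
  | nil => simp [resA, rhs2]
  | cons c t ih =>
    by_cases ha : isA c = true
    · simp [isA] at ha
      have h1 : resA (c :: t) (2, true) = resA t (2, true) := by
        simp only [resA, List.foldl_cons]
        rcases ha with h | h <;> simp [yasInner, h]
      have h2 : rhs2 (c :: t) = rhs2 t := by
        simp [rhs2, isA, ha]
      rw [h1, h2, ih]
    · have hd : (c :: t).dropWhile isA = c :: t := by
        simp [ha]
      by_cases hs : isS c = true
      · have h1 : resA (c :: t) (2, true) = resA t (3, true) := by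
          simp only [resA, List.foldl_cons]
          simp [isA] at ha
          simp [isS] at hs
          rcases hs with h | h <;> simp [yasInner, h]
        rw [h1, resA_three]
        simp [rhs2, hd, hs]
      · have h1 : resA (c :: t) (2, true) = false := by
          simp only [resA, List.foldl_cons]
          simp [isA] at ha; simp [isS] at hs
          have : yasInner (2, true) c = (2, false) := by
            simp [yasInner, ha.1, ha.2, hs.1, hs.2]
          rw [this]; exact resA_false t 2
        rw [h1]
        simp [rhs2, hd, hs]
      
theorem resA_one (l : List Char) : resA l (1, true) = rhs1 l := by
  induction l with
  | nil => simp [resA, rhs1]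
  | cons c t ih =>
    by_cases hy : isY c = true
    · have h1 : resA (c :: t) (1, true) = resA t (1, true) := by
        simp only [resA, List.foldl_cons]
        simp [isY] at hy
        rcases hy with h | h <;> simp [yasInner, h]
      have h2 : rhs1 (c :: t) = rhs1 t := by
        simp [rhs1, hy]
      rw [h1, h2, ih]
    · have hd : rhs1 (c :: t) = (isA c && rhs2 t) := by
        simp [rhs1, hy]
      rw [hd]
      by_cases ha : isA c = true
      · have h1 : resA (c :: t) (1, true) = resA t (2, true) := by
          simp only [resA, List.foldl_cons]
          simp [isY] at hy; simp [isA] at ha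
          rcases ha with h | h <;> simp [yasInner, h]
        rw [h1, resA_two]
        simp [ha]
      · have h1 : resA (c :: t) (1, true) = false := by
          simp only [resA, List.foldl_cons]
          simp [isY] at hy; simp [isA] at ha
          have : yasInner (1, true) c = (1, false) := by
            simp [yasInner, hy.1, hy.2, ha.1, ha.2]
          rw [this]; exact resA_false t 1
        rw [h1]; simp [ha]

theorem resA_zero (l : List Char) :
    resA l (0, true) = (match l with
      | [] => false
      | c :: t => isY c && rhs1 t) := by
  cases l with
  | nil => simp [resA]
  | cons c t =>
    by_cases hy : isY c = true
    · have h1 : resA (c :: t) (0, true) = resA t (1, true) := by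
        simp only [resA, List.foldl_cons]
        simp [isY] at hy
        rcases hy with h | h <;> simp [yasInner, h]
      rw [h1, resA_one]; simp [hy]
    · have h1 : resA (c :: t) (0, true) = false := by
        simp only [resA, List.foldl_cons]
        simp [isY] at hy
        have : yasInner (0, true) c = (0, false) := by
          simp [yasInner, hy.1, hy.2]
        rw [this]; exact resA_false t 0
      rw [h1]; simp [hy]

theorem alt_eq_chain (l : List Char) :
    (match matchPlus isY l with
      | none => false
      | some r1 =>
        match matchPlus isA r1 with
        | none => false
        | some r2 =>
          match matchPlus isS r2 with
          | none => false
          | some r3 => r3.isEmpty) =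
    (match l with | [] => false | c :: t => isY c && rhs1 t) := by
  cases l with
  | nil => simp [matchPlus]
  | cons c t =>
    by_cases hy : isY c = true
    · simp only [matchPlus, hy, if_pos, Bool.true_and]
      -- goal: inner chain on (t.dropWhile isY) = rhs1 t
      rw [show rhs1 t = (match t.dropWhile isY with
          | [] => false
          | d :: u => isA d && rhs2 u) from rfl]
      cases hr : t.dropWhile isY with
      | nil => simp
      | cons d u =>
        by_cases ha : isA d = true
        · simp only [matchPlus, ha, if_pos]
          rw [show rhs2 u = (let r := u.dropWhile isA; !r.isEmpty && r.all isS) from rfl]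
          cases hr2 : u.dropWhile isA with
          | nil => simp
          | cons e v =>
            by_cases hs : isS e = true
            · simp only [matchPlus, hs, if_pos]
              by_cases hv : ∀ x ∈ v, isS x = true
              · rw [List.dropWhile_eq_nil_iff.mpr hv]
                simp [hs, List.all_eq_true.mpr hv]
              · have hv1 : v.all isS = false := by simpa [List.all_eq_true] using hv
                have hv2 : v.dropWhile isS ≠ [] := fun h => hv (List.dropWhile_eq_nil_iff.mp h)
                simp [hv1, hs, hv2]
            · simp [hs]
        · simp [ha]
    · simp [matchPlus, hy]

-- ===== VERDICT (by name: the statement is the Claim_ definition above) =====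
theorem isYas_spec : Claim_equal_isYas := by
  intro word _
  unfold Spec_isYas
  have hA : isYas word = resA (word.toList.filter PySem.Chars.isalpha) (0, true) := by
    simp only [isYas, resA, List.foldl_filter]
  rw [hA, resA_zero, ← alt_eq_chain]
  rfl
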